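-- pv_equiv track=rewrite | github.com/deepwizai/robust-normalization | perturb/sieve_pert.py | hyphenate
-- ===== SOURCE A (Python) =====
-- def hyphenate(entity):
--   words = entity.split()
--   new_entities = []
--   for i in range(1, len(words)):
--     new_entities.append(' '.join(words[:i]) + '-' + ' '.join(words[i:]))
--   if len(new_entities)==0:
--     return entity
--   return new_entities
-- ===== SOURCE B (Python) =====
-- def hyphenate(entity):
--     s = ' '.join(entity.split())
--     if ' ' not in s:
--         return entity
--     return [s[:i] + '-' + s[i + 1:] for i, c in enumerate(s) if c == ' ']
-- ===== Notes on version B (the rewrite author's own statement) =====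
-- stated objective: alternative
-- what changed: B joins the words into one normalized string once and produces each variant by replacing a single space position in that string, instead of re-joining prefix/suffix word slices for every split point.
-- outside the precondition, e.g. on hyphenate('abc'): A returns 'abc', B returns 'abc'; on hyphenate('  hi  '): A returns '  hi  ', B returns '  hi  '
import Mathlib
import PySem

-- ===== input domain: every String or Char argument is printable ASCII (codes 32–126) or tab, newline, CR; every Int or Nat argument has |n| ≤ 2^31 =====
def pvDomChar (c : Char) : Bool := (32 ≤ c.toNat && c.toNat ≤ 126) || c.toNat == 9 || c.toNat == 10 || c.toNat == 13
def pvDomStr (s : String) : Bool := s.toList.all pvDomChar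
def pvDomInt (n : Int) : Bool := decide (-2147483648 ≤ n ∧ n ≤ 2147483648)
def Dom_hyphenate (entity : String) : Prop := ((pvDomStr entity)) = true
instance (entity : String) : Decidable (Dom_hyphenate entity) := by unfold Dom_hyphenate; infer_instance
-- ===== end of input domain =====

-- B builds the normalized ' '.join string once and emits one variant per space position in it,
-- instead of re-joining prefix/suffix word slices for every split point (alternative decomposition, similar cost).


-- ===== PORT A =====
def hyphenate (entity : String) : List String :=
  let words := PySem.Str.split₀ entity
  let newEntities := (PySem.List.pyRange 1 words.length 1).foldl
    (fun acc i => acc ++ [PySem.Str.join " " (PySem.List.slice words none (some i)) ++ "-"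
                          ++ PySem.Str.join " " (PySem.List.slice words (some i) none)]) []
  if newEntities.length = 0 then [entity] -- Python A returns the bare string `entity` here, not a list: outside Pre_
  else newEntities

-- ===== PORT B =====
def hyphenate_alt (entity : String) : List String :=
  let s := PySem.Str.join " " (PySem.Str.split₀ entity)
  if PySem.Str.isIn " " s = false then [entity] -- Python B returns the bare string `entity` here, not a list: outside Pre_
  else ((PySem.List.enumerate s.toList 0).filter (fun p => p.2 == ' ')).map
    (fun p => PySem.Str.slice s none (some p.1) ++ "-" ++ PySem.Str.slice s (some (p.1 + 1)) none)

-- ===== PRECONDITION & SPEC =====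
-- Pre_ excludes inputs with fewer than two whitespace-separated words: there the Python A (and B alike)
-- returns the bare input STRING instead of a list of strings, which is not a value of the declared return type.
def Pre_hyphenate (entity : String) : Prop := 2 ≤ (PySem.Str.split₀ entity).length
instance (entity : String) : Decidable (Pre_hyphenate entity) := by unfold Pre_hyphenate; infer_instance
def pvWitness_hyphenate : String := "a b"
def Spec_hyphenate (entity : String) (out : List String) : Prop := out = hyphenate_alt entity
instance (entity : String) (out : List String) : Decidable (Spec_hyphenate entity out) := by unfold Spec_hyphenate; infer_instance

-- ===== CLAIM (what is proved, stated in full; the proofs are below) =====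
def Claim_equal_hyphenate : Prop := ∀ (entity : String), Dom_hyphenate entity → Pre_hyphenate entity → Spec_hyphenate entity (hyphenate entity)

-- ===== LEMMAS AND PROOFS =====

-- every word produced by str.split() is nonempty and free of whitespace characters
theorem split0_go_words (cs cur : List Char) (acc : List (List Char))
    (hcur : ∀ c ∈ cur, PySem.Chars.isspace c = false)
    (hacc : ∀ w ∈ acc, w ≠ [] ∧ ∀ c ∈ w, PySem.Chars.isspace c = false) :
    ∀ w ∈ PySem.Chars.split₀.go cs cur acc, w ≠ [] ∧ ∀ c ∈ w, PySem.Chars.isspace c = false := by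
  induction cs generalizing cur acc with
  | nil =>
    intro w hw
    by_cases h : cur.isEmpty = true
    · simp [PySem.Chars.split₀.go, h] at hw
      exact hacc w (by simpa using hw)
    · simp [PySem.Chars.split₀.go, h] at hw
      rcases hw with h2 | h1
      · exact hacc w h2
      · subst h1
        refine ⟨by simpa [List.isEmpty_iff] using h, ?_⟩
        intro c hc; exact hcur c (List.mem_reverse.mp hc)
  | cons c rest ih =>
    intro w hw
    by_cases hs : PySem.Chars.isspace c = true
    · by_cases he : cur.isEmpty = true
      · simp [PySem.Chars.split₀.go, hs, he] at hw
        exact ih [] acc (by simp) hacc w hw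
      · simp [PySem.Chars.split₀.go, hs, he] at hw
        refine ih [] (cur.reverse :: acc) (by simp) ?_ w hw
        intro v hv
        rcases List.mem_cons.mp hv with h1 | h2
        · subst h1
          refine ⟨by simpa [List.isEmpty_iff] using he, ?_⟩
          intro d hd; exact hcur d (List.mem_reverse.mp hd)
        · exact hacc v h2
    · simp [PySem.Chars.split₀.go, hs] at hw
      refine ih (c :: cur) acc ?_ hacc w hw
      intro d hd
      rcases List.mem_cons.mp hd with h1 | h2
      · subst h1; simpa using hs
      · exact hcur d h2

theorem split0_words (cs : List Char) :
    ∀ w ∈ PySem.Chars.split₀ cs, w ≠ [] ∧ ∀ c ∈ w, PySem.Chars.isspace c = false :=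
  split0_go_words cs [] [] (by simp) (by simp)

theorem filter_enumerate_no_space (w : List Char) (s : Int) (hw : ' ' ∉ w) :
    (PySem.List.enumerate w s).filter (fun p => p.2 == ' ') = [] := by
  induction w generalizing s with
  | nil => simp [PySem.List.enumerate_nil]
  | cons c cs ih =>
    rw [PySem.List.enumerate_cons]
    have hc : c ≠ ' ' := by intro h; exact hw (h ▸ List.mem_cons_self)
    simp [hc, ih (s+1) (fun h => hw (List.mem_cons_of_mem _ h))]

theorem enumerate_shift (xs : List Char) (s : Int) :
    PySem.List.enumerate xs s = (PySem.List.enumerate xs 0).map (fun p => (p.1 + s, p.2)) := by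
  induction xs generalizing s with
  | nil => simp [PySem.List.enumerate_nil]
  | cons x xs ih =>
    rw [PySem.List.enumerate_cons, PySem.List.enumerate_cons, ih (s+1), ih (0+1)]
    simp [List.map_map, Function.comp_def]
    intro a b _; ring

-- the single variant B emits for the space at position j of s
def entryC (s : List Char) (j : Nat) : List Char := s.take j ++ '-' :: s.drop (j + 1)

-- B's result on char lists: one entry per space position of the joined string
def bListC (s : List Char) : List (List Char) :=
  ((PySem.List.enumerate s 0).filter (fun p => p.2 == ' ')).map (fun p => entryC s p.1.toNat)

-- A's result on char lists: one entry per split point of the word list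
def aListC (ws : List (List Char)) : List (List Char) :=
  (List.range (ws.length - 1)).map
    (fun k => List.intercalate [' '] (ws.take (k + 1)) ++ '-' :: List.intercalate [' '] (ws.drop (k + 1)))

theorem bListC_cons (w t : List Char) (hw : ' ' ∉ w) :
    bListC (w ++ ' ' :: t) = (w ++ '-' :: t) :: (bListC t).map (fun e => w ++ ' ' :: e) := by
  unfold bListC
  rw [show w ++ ' ' :: t = w ++ ([' '] ++ t) from by simp,
      PySem.List.enumerate_append, List.filter_append, filter_enumerate_no_space w 0 hw,
      PySem.List.enumerate_append]
  rw [show PySem.List.enumerate [' '] (0 + (w.length : Int)) = [((w.length : Int), ' ')] from by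
        simp [PySem.List.enumerate_cons, PySem.List.enumerate_nil]]
  rw [enumerate_shift t]
  simp only [List.nil_append, List.filter_append, List.filter_cons, List.filter_nil,
    List.filter_map, List.map_append, List.map_map]
  simp only [show (' ' == ' ') = true from rfl, if_pos, Function.comp_def, List.map_cons,
    List.map_nil, List.cons_append, List.nil_append]
  congr 1
  · show entryC (w ++ ' ' :: t) ((w.length : Int)).toNat = w ++ '-' :: t
    rw [show w ++ ' ' :: t = w ++ ([' '] ++ t) from by simp]
    simp only [entryC, Int.toNat_natCast]
    rw [List.take_append_of_le_length le_rfl, List.take_length, ← List.append_assoc,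
        show w.length + 1 = (w ++ [' ']).length from by simp, List.drop_left]
  · apply List.map_congr_left
    intro p hp
    have hp' := List.mem_of_mem_filter hp
    rcases ((PySem.List.mem_enumerate_iff _ _ _).mp hp') with ⟨k, hk, rfl⟩
    show entryC (w ++ ' ' :: t) (((0:Int) + (k:Int) + (0 + (w.length:Int) + (([' ']:List Char).length:Int))).toNat)
        = w ++ ' ' :: entryC t ((0:Int) + k).toNat
    rw [show w ++ ' ' :: t = (w ++ [' ']) ++ t from by simp]
    have h1 : (((0:Int) + (k:Int) + (0 + (w.length:Int) + (([' ']:List Char).length:Int)))).toNat = (w ++ [' ']).length + k := by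
      simp; omega
    have h2 : ((0:Int) + (k:Int)).toNat = k := by omega
    rw [h1, h2, entryC, entryC, List.take_length_add_append]
    rw [show (w ++ [' ']).length + k + 1 = (w ++ [' ']).length + (k + 1) from by omega,
        List.drop_length_add_append]
    simp

theorem intercalate_cons_ne (w : List Char) (l : List (List Char)) (h : l ≠ []) :
    List.intercalate [' '] (w :: l) = w ++ ' ' :: List.intercalate [' '] l := by
  match l with
  | x :: rest => simp [List.intercalate]

theorem aListC_cons (w x : List Char) (rest : List (List Char)) :
    aListC (w :: x :: rest) =
      (w ++ '-' :: List.intercalate [' '] (x :: rest)) :: (aListC (x :: rest)).map (fun e => w ++ ' ' :: e) := by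
  unfold aListC
  simp only [List.length_cons, Nat.add_sub_cancel, List.range_succ_eq_map, List.map_cons, List.map_map]
  congr 1
  · simp [List.intercalate]
  · apply List.map_congr_left
    intro k _
    simp only [Function.comp_def, Nat.succ_eq_add_one]
    rw [show List.take (k + 1 + 1) (w :: x :: rest) = w :: List.take (k + 1) (x :: rest) from rfl,
        show List.drop (k + 1 + 1) (w :: x :: rest) = List.drop (k + 1) (x :: rest) from rfl,
        intercalate_cons_ne w _ (by simp)]
    simp

-- the heart of the equivalence: on a list of nonempty space-free words, replacing the spaces of the
-- joined string one by one (B) produces exactly the prefix/suffix re-joins of A, in the same order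
theorem main_char (ws : List (List Char))
    (hws : ∀ w ∈ ws, w ≠ [] ∧ ' ' ∉ w) (hne : ws ≠ []) :
    bListC (List.intercalate [' '] ws) = aListC ws := by
  induction ws with
  | nil => exact absurd rfl hne
  | cons w tail ih =>
    match tail with
    | [] =>
      have hw : ' ' ∉ w := (hws w (by simp)).2
      simp [bListC, aListC, List.intercalate, filter_enumerate_no_space w 0 hw]
    | x :: rest =>
      have hwP := hws w (by simp)
      have htail : ∀ v ∈ x :: rest, v ≠ [] ∧ ' ' ∉ v := fun v hv => hws v (List.mem_cons_of_mem _ hv)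
      rw [intercalate_cons_ne w _ (by simp), bListC_cons w _ hwP.2, ih htail (by simp), aListC_cons]

theorem join_ofList (X : List (List Char)) :
    PySem.Str.join " " (X.map String.ofList) = String.ofList (List.intercalate [' '] X) := by
  simp [PySem.Str.join, PySem.Chars.join, List.map_map, Function.comp_def, String.toList_ofList]

theorem space_infix (L : List (List Char)) (h : 2 ≤ L.length) :
    ([' '] : List Char) <:+: List.intercalate [' '] L := by
  match L, h with
  | w1 :: w2 :: rest, _ =>
    refine ⟨w1, List.intercalate [' '] (w2 :: rest), ?_⟩
    rw [intercalate_cons_ne w1 _ (by simp)]; simp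

theorem hyphenate_eval (entity : String) (h : 2 ≤ (PySem.Chars.split₀ entity.toList).length) :
    hyphenate entity = (aListC (PySem.Chars.split₀ entity.toList)).map String.ofList := by
  set L := PySem.Chars.split₀ entity.toList with hL
  unfold hyphenate
  simp only [PySem.Str.split₀, ← hL, PySem.List.foldl_append_singleton_eq_map, List.nil_append,
    List.length_map]
  rw [if_neg (by rw [PySem.List.length_pyRange_one]; omega)]
  rw [PySem.List.pyRange_one, List.map_map]
  unfold aListC
  rw [show ((L.length : Int) - 1).toNat = L.length - 1 from by omega, List.map_map]
  apply List.map_congr_left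
  intro k hk
  have hk' : k < L.length - 1 := List.mem_range.mp hk
  simp only [Function.comp_def]
  rw [PySem.List.slice_to (L.map String.ofList) (b := 1 + (k : Int)) (by omega),
      PySem.List.slice_from (L.map String.ofList) (a := 1 + (k : Int)) (by omega),
      show ((1 : Int) + (k : Int)).toNat = k + 1 from by omega,
      ← List.map_take, ← List.map_drop, join_ofList, join_ofList,
      show ("-" : String) = String.ofList ['-'] from rfl,
      ← String.ofList_append, ← String.ofList_append]
  congr 1
  simp

theorem hyphenate_alt_eval (entity : String) (h : 2 ≤ (PySem.Chars.split₀ entity.toList).length) :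
    hyphenate_alt entity = (bListC (List.intercalate [' '] (PySem.Chars.split₀ entity.toList))).map String.ofList := by
  set L := PySem.Chars.split₀ entity.toList with hL
  set S := List.intercalate [' '] L with hS
  unfold hyphenate_alt
  simp only [PySem.Str.split₀, ← hL, join_ofList, ← hS]
  have hguard : PySem.Chars.isIn [' '] S = true :=
    (PySem.Chars.isIn_iff_infix _ _).mpr (space_infix L h)
  rw [if_neg (by simp [hguard, String.toList_ofList])]
  rw [String.toList_ofList, bListC, List.map_map]
  apply List.map_congr_left
  intro p hp
  have hp' := List.mem_of_mem_filter hp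
  rcases ((PySem.List.mem_enumerate_iff _ _ _).mp hp') with ⟨k, hk, rfl⟩
  simp only [Function.comp_def]
  rw [show PySem.Str.slice (String.ofList S) none (some ((0:Int) + k, S[k]).1)
        = String.ofList (PySem.List.slice S none (some ((0:Int) + k))) from by
      simp [PySem.Str.slice, String.toList_ofList],
     show PySem.Str.slice (String.ofList S) (some (((0:Int) + k, S[k]).1 + 1)) none
        = String.ofList (PySem.List.slice S (some ((0:Int) + k + 1)) none) from by
      simp [PySem.Str.slice, String.toList_ofList]]
  rw [PySem.List.slice_to S (b := (0:Int) + k) (by omega),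
      PySem.List.slice_from S (a := (0:Int) + k + 1) (by omega)]
  rw [show ((0:Int) + (k:Int)).toNat = k from by omega,
      show ((0:Int) + (k:Int) + 1).toNat = k + 1 from by omega,
      show ("-" : String) = String.ofList ['-'] from rfl,
      ← String.ofList_append, ← String.ofList_append]
  congr 1
  simp [entryC]

-- ===== VERDICT (by name: the statement is the Claim_ definition above) =====
theorem hyphenate_spec : Claim_equal_hyphenate := by
  intro entity _ hpre
  unfold Spec_hyphenate
  have h : 2 ≤ (PySem.Chars.split₀ entity.toList).length := by
    simpa [Pre_hyphenate, PySem.Str.split₀] using hpre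
  rw [hyphenate_eval entity h, hyphenate_alt_eval entity h, main_char]
  · intro w hw
    have h2 := split0_words entity.toList w hw
    refine ⟨h2.1, fun hmem => ?_⟩
    have h3 := h2.2 ' ' hmem
    simp [PySem.Chars.isspace] at h3
  · intro hnil; rw [hnil] at h; simp at h
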